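-- pv_equiv track=rewrite | github.com/filp8/algoritmi | algo2/batteria2/es7/es7V.py | soottoalbero
-- ===== SOURCE A (Python) =====
-- def soottoalbero(f_padri, radice, inizioAlbero):
--     def _sottoalbero(f_padri, radice, sottoalbero, inizioAlbero):
--         sottoalbero.append(radice)
--         i = inizioAlbero
--         for nodo in f_padri:
--             if nodo == radice:
--                 _sottoalbero(f_padri, i, sottoalbero, inizioAlbero)
--             i+=1
--     sottoalbero = []
--     _sottoalbero(f_padri, radice, sottoalbero, inizioAlbero)
--     return sottoalbero
-- ===== SOURCE B (Python) =====
-- def soottoalbero(f_padri, radice, inizioAlbero):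
--     children = {}
--     for i, p in enumerate(f_padri, inizioAlbero):
--         children.setdefault(p, []).append(i)
--     out = []
--     def visit(nodo):
--         out.append(nodo)
--         for c in children.get(nodo, []):
--             visit(c)
--     visit(radice)
--     return out
-- ===== Notes on version B (the rewrite author's own statement) =====
-- stated objective: alternative
-- what changed: B builds a parent->children adjacency dict in one pass and then does a plain preorder DFS over it, instead of A's rescanning the whole parent array once per visited node.
import Mathlib
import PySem

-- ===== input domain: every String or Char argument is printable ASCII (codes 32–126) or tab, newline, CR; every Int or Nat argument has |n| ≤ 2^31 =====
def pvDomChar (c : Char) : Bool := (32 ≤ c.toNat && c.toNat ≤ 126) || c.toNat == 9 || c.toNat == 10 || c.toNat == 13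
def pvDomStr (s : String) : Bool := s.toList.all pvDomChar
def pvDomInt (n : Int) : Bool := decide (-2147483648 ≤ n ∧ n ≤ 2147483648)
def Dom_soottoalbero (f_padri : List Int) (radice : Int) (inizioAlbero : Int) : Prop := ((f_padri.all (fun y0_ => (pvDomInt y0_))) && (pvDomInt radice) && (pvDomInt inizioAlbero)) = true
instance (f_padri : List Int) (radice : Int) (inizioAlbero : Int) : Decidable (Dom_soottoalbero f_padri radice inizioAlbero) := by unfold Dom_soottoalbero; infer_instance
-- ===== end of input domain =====

-- B replaces A's per-node rescan of the whole parent array by a children adjacency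
-- dict built once plus a preorder DFS over it.
-- Both programs recurse; the ports carry fuel (f_padri.length + 1) solely to be total
-- in Lean — under Pre_ the recursion depth never exceeds it.

-- ===== PORT A =====
mutual
def dfsA (f_padri : List Int) (inizioAlbero : Int) : Nat → Int → List Int → List Int
  | 0, _, sotto => sotto
  | fuel+1, radice, sotto =>
      loopA f_padri inizioAlbero fuel f_padri inizioAlbero radice (sotto ++ [radice])
  termination_by fuel _ _ => (fuel, 0)

def loopA (f_padri : List Int) (inizioAlbero : Int) : Nat → List Int → Int → Int → List Int → List Int
  | _, [], _, _, sotto => sotto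
  | fuel, nodo :: rest, i, radice, sotto =>
      loopA f_padri inizioAlbero fuel rest (i+1) radice
        (if nodo == radice then dfsA f_padri inizioAlbero fuel i sotto else sotto)
  termination_by fuel l _ _ _ => (fuel, l.length + 1)
end

def soottoalbero (f_padri : List Int) (radice : Int) (inizioAlbero : Int) : List Int :=
  dfsA f_padri inizioAlbero (f_padri.length + 1) radice []

-- ===== PORT B =====
def buildChildren (f_padri : List Int) (inizioAlbero : Int) : PySem.Dict Int (List Int) :=
  (PySem.List.enumerate f_padri inizioAlbero).foldl
    (fun d q => d.modify q.2 [] (· ++ [q.1])) PySem.Dict.empty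

mutual
def dfsB (children : PySem.Dict Int (List Int)) : Nat → Int → List Int → List Int
  | 0, _, out => out
  | fuel+1, nodo, out => loopB children fuel (children.getD nodo []) (out ++ [nodo])
  termination_by fuel _ _ => (fuel, 0)

def loopB (children : PySem.Dict Int (List Int)) : Nat → List Int → List Int → List Int
  | _, [], out => out
  | fuel, c :: rest, out => loopB children fuel rest (dfsB children fuel c out)
  termination_by fuel l _ => (fuel, l.length + 1)
end

def soottoalbero_alt (f_padri : List Int) (radice : Int) (inizioAlbero : Int) : List Int :=
  dfsB (buildChildren f_padri inizioAlbero) (f_padri.length + 1) radice []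

-- ===== PRECONDITION & SPEC =====
-- one step up the parent pointers: the parent label recorded for the node labelled x
def ancStep (f_padri : List Int) (inizioAlbero : Int) (x : Int) : Option Int :=
  if 0 ≤ x - inizioAlbero then PySem.List.pyGet? f_padri (x - inizioAlbero) else none

def ancIter (f_padri : List Int) (inizioAlbero : Int) : Nat → Int → Option Int
  | 0, x => some x
  | k+1, x => (ancStep f_padri inizioAlbero x).bind (ancIter f_padri inizioAlbero k)

-- Pre_ excludes exactly the inputs on which `radice` lies on a cycle of the parent
-- pointers: there the Python A recurses without bound (RecursionError), returning nothing.
def Pre_soottoalbero (f_padri : List Int) (radice : Int) (inizioAlbero : Int) : Prop :=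
  ∀ k : Nat, k ≤ f_padri.length → 1 ≤ k →
    ancIter f_padri inizioAlbero k radice ≠ some radice

instance (f_padri : List Int) (radice : Int) (inizioAlbero : Int) : Decidable (Pre_soottoalbero f_padri radice inizioAlbero) := by
  unfold Pre_soottoalbero; infer_instance

def pvWitness_soottoalbero : List Int × Int × Int := ([0, 0, 1], 0, 1)

def Spec_soottoalbero (f_padri : List Int) (radice : Int) (inizioAlbero : Int) (out : List Int) : Prop := out = soottoalbero_alt f_padri radice inizioAlbero
instance (f_padri : List Int) (radice : Int) (inizioAlbero : Int) (out : List Int) : Decidable (Spec_soottoalbero f_padri radice inizioAlbero out) := by unfold Spec_soottoalbero; infer_instance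

-- ===== CLAIM (what is proved, stated in full; the proofs are below) =====
def Claim_equal_soottoalbero : Prop := ∀ (f_padri : List Int) (radice : Int) (inizioAlbero : Int), Dom_soottoalbero f_padri radice inizioAlbero → Pre_soottoalbero f_padri radice inizioAlbero → Spec_soottoalbero f_padri radice inizioAlbero (soottoalbero f_padri radice inizioAlbero)

-- ===== LEMMAS AND PROOFS =====

-- specification of the children lists: labels i of entries of l (labelled from i0) whose parent is x
def kids : List Int → Int → Int → List Int
  | [], _, _ => []
  | p :: rest, i, x => (if p = x then [i] else []) ++ kids rest (i+1) x

theorem filter_swap_enumerate (f : List Int) (i x : Int) :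
    (((PySem.List.enumerate f i).map Prod.swap).filter (fun p => p.1 == x)).map (·.2)
      = kids f i x := by
  induction f generalizing i with
  | nil => simp [PySem.List.enumerate_nil, kids]
  | cons p rest ih =>
      simp only [PySem.List.enumerate_cons, List.map_cons, List.filter_cons, Prod.swap,
        kids]
      by_cases h : p = x
      · simp [h, ih]
      · simp [h, ih]

theorem getD_buildChildren (f : List Int) (st x : Int) :
    (buildChildren f st).getD x [] = kids f st x := by
  have hmap : buildChildren f st
      = ((PySem.List.enumerate f st).map Prod.swap).foldl
          (fun d p => d.modify p.1 [] (· ++ [p.2])) PySem.Dict.empty := by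
    rw [List.foldl_map]
    rfl
  rw [hmap, PySem.Dict.getD_foldl_modify_append, PySem.Dict.getD_empty,
    List.nil_append, filter_swap_enumerate]

theorem loopA_eq_loopB (f : List Int) (st : Int) (ch : PySem.Dict Int (List Int))
    (fuel : Nat)
    (hdfs : ∀ r s, dfsA f st fuel r s = dfsB ch fuel r s) :
    ∀ (l : List Int) (i r : Int) (s : List Int),
      loopA f st fuel l i r s = loopB ch fuel (kids l i r) s := by
  intro l
  induction l with
  | nil => intro i r s; simp [loopA, loopB, kids]
  | cons p rest ih =>
      intro i r s
      rw [loopA, kids]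
      by_cases h : p = r
      · simp only [h, beq_self_eq_true, if_true, List.singleton_append]
        rw [loopB, ih, hdfs]
      · have hb : (p == r) = false := by simp [h]
        simp only [if_neg h, hb, Bool.false_eq_true, if_false, List.nil_append]
        exact ih (i+1) r s

theorem dfsA_eq_dfsB (f : List Int) (st : Int) (ch : PySem.Dict Int (List Int))
    (hch : ∀ x, ch.getD x [] = kids f st x) :
    ∀ (fuel : Nat) (r : Int) (s : List Int),
      dfsA f st fuel r s = dfsB ch fuel r s := by
  intro fuel
  induction fuel with
  | zero => intro r s; rw [dfsA, dfsB]
  | succ fuel ih =>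
      intro r s
      rw [dfsA, dfsB, hch]
      exact loopA_eq_loopB f st ch fuel ih f st r (s ++ [r])

-- ===== VERDICT (by name: the statement is the Claim_ definition above) =====
theorem soottoalbero_spec : Claim_equal_soottoalbero := by
  intro f_padri radice inizioAlbero _ _
  unfold Spec_soottoalbero soottoalbero soottoalbero_alt
  exact dfsA_eq_dfsB f_padri inizioAlbero (buildChildren f_padri inizioAlbero)
    (fun x => (getD_buildChildren f_padri inizioAlbero x).symm ▸ rfl)
    (f_padri.length + 1) radice []
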